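-- pv_equiv track=rewrite | github.com/orikam/advantcoding_2022 | day8/d8q1.py | count_visable
-- ===== SOURCE A (Python) =====
-- def count_visable(maps):
--     count = 0
--     map = maps[0]
--     res = []
--     for j in range(len(map)):
--         raw = []
--         for i in range(len(map[0])):
--             sum = 0
--             for m in maps:
--                 sum += m[j][i]
--             if sum > 0:
--                 count += 1
--                 raw.append(1)
--             else:
--                 raw.append(0)
--         res.append(raw)
--     return (count, res)
-- ===== SOURCE B (Python) =====
-- def count_visable(maps):
--     rows = len(maps[0])
--     cols = len(maps[0][0]) if rows else 0
--     sums = [[0] * cols for _ in range(rows)]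
--     for m in maps:
--         for j in range(rows):
--             for i in range(cols):
--                 sums[j][i] += m[j][i]
--     res = [[1 if s > 0 else 0 for s in row] for row in sums]
--     count = sum(x for row in res for x in row)
--     return (count, res)
-- ===== Notes on version B (the rewrite author's own statement) =====
-- stated objective: alternative
-- what changed: A classifies each cell by re-scanning all maps per cell (map-innermost triple loop with in-loop count/append); B first builds an elementwise-sum grid by iterating map-outermost, then a separate threshold pass produces the 0/1 grid and the count is a sum over that grid.
import Mathlib
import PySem

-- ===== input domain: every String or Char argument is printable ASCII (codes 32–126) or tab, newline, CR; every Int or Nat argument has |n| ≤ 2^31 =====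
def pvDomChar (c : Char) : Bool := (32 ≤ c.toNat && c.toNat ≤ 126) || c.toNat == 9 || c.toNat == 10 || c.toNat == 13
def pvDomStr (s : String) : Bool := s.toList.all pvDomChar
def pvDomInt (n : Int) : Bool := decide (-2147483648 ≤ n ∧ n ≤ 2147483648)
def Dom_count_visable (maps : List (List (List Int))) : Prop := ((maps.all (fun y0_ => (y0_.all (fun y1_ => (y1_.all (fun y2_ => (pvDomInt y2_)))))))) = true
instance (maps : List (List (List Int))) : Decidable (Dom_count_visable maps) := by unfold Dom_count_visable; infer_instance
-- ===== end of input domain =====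

-- B replaces A's cell-by-cell rescans of all maps with a summed grid built map-outermost plus a separate threshold pass (alternative decomposition, same cost).


-- ===== PORT A =====
-- indices come from range(...) so they are nonnegative; out-of-range access (Python IndexError) is excluded by Pre_, the port defaults with getD there
def count_visable (maps : List (List (List Int))) : Int × List (List Int) :=
  let mp := maps.getD 0 []
  (List.range mp.length).foldl
    (fun (st : Int × List (List Int)) j =>
      let inner := (List.range (mp.getD 0 []).length).foldl
        (fun (st2 : Int × List Int) i =>
          let s : Int := maps.foldl (fun acc m => acc + ((m.getD j []).getD i 0)) 0
          if s > 0 then (st2.1 + 1, st2.2 ++ [1]) else (st2.1, st2.2 ++ [0]))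
        (st.1, ([] : List Int))
      (inner.1, st.2 ++ [inner.2]))
    (0, ([] : List (List Int)))

-- ===== PORT B =====
-- in-place "sums[j][i] += m[j][i]" ported as a functional rebuild of the grid
def count_visable_alt (maps : List (List (List Int))) : Int × List (List Int) :=
  let rows := (maps.getD 0 []).length
  let cols := if rows = 0 then 0 else ((maps.getD 0 []).getD 0 []).length
  let sums := maps.foldl
    (fun (s : List (List Int)) m =>
      (List.range rows).map (fun j => (List.range cols).map (fun i =>
        (s.getD j []).getD i 0 + (m.getD j []).getD i 0)))
    (List.replicate rows (List.replicate cols (0 : Int)))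
  let res := sums.map (fun row => row.map (fun s => if s > 0 then (1 : Int) else 0))
  let count := res.foldl (fun c row => row.foldl (· + ·) c) 0
  (count, res)

-- ===== PRECONDITION & SPEC =====
-- Pre_ excludes exactly the inputs where Python A raises IndexError: empty maps, or (when
-- maps[0][0] is nonempty, so cells are actually read) some map shorter than maps[0] or with a
-- row among the first len(maps[0]) rows shorter than maps[0][0].
def Pre_count_visable (maps : List (List (List Int))) : Prop :=
  maps ≠ [] ∧ (((maps.headD []).headD []).length = 0 ∨
    ∀ m ∈ maps, (maps.headD []).length ≤ m.length ∧
      ∀ row ∈ m.take (maps.headD []).length, ((maps.headD []).headD []).length ≤ row.length)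
instance (maps : List (List (List Int))) : Decidable (Pre_count_visable maps) := by
  unfold Pre_count_visable; infer_instance
def pvWitness_count_visable : List (List (List Int)) := [[[1, -2], [0, 3]], [[-1, 5], [2, -3]]]

def Spec_count_visable (maps : List (List (List Int))) (out : Int × List (List Int)) : Prop := out = count_visable_alt maps
instance (maps : List (List (List Int))) (out : Int × List (List Int)) : Decidable (Spec_count_visable maps out) := by unfold Spec_count_visable; infer_instance

-- ===== CLAIM (what is proved, stated in full; the proofs are below) =====
def Claim_equal_count_visable : Prop := ∀ (maps : List (List (List Int))), Dom_count_visable maps → Pre_count_visable maps → Spec_count_visable maps (count_visable maps)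

-- ===== LEMMAS AND PROOFS =====

-- total of cell (j,i) across all maps, as A's innermost fold computes it
def pvTot (maps : List (List (List Int))) (j i : Nat) : Int :=
  maps.foldl (fun acc m => acc + ((m.getD j []).getD i 0)) 0

def pvG (maps : List (List (List Int))) (j i : Nat) : Int :=
  if pvTot maps j i > 0 then 1 else 0

theorem pvTot_cons (maps : List (List (List Int))) (m : List (List Int)) (j i : Nat) :
    pvTot (m :: maps) j i = ((m.getD j []).getD i 0) + pvTot maps j i := by
  simp only [pvTot, List.foldl_cons]
  rw [PySem.List.foldl_add maps (fun m => ((m.getD j []).getD i 0)),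
      PySem.List.foldl_add maps (fun m => ((m.getD j []).getD i 0))]
  ring

theorem pv_sums_eq (rows cols : Nat) (ms : List (List (List Int))) (f : Nat → Nat → Int) :
    ms.foldl
      (fun (s : List (List Int)) m =>
        (List.range rows).map (fun j => (List.range cols).map (fun i =>
          (s.getD j []).getD i 0 + (m.getD j []).getD i 0)))
      ((List.range rows).map (fun j => (List.range cols).map (fun i => f j i)))
    = (List.range rows).map (fun j => (List.range cols).map (fun i => f j i + pvTot ms j i)) := by
  induction ms generalizing f with
  | nil => simp [pvTot]
  | cons m ms ih =>
      simp only [List.foldl_cons]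
      have hstep : ((List.range rows).map (fun j => (List.range cols).map fun i =>
          ((((List.range rows).map (fun j => (List.range cols).map fun i => f j i)).getD j []).getD i 0 + (m.getD j []).getD i 0)))
          = (List.range rows).map (fun j => (List.range cols).map fun i => (f j i + (m.getD j []).getD i 0)) := by
        apply List.map_congr_left
        intro j hj
        rw [PySem.List.getD_map_range _ _ _ _ (List.mem_range.mp hj)]
        apply List.map_congr_left
        intro i hi
        rw [PySem.List.getD_map_range _ _ _ _ (List.mem_range.mp hi)]
      rw [hstep, ih (fun j i => f j i + (m.getD j []).getD i 0)]
      apply List.map_congr_left; intro j _; apply List.map_congr_left; intro i _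
      rw [pvTot_cons]; ring

-- A's inner loop builds the 0/1 row and adds the positives to the count
theorem pv_inner (maps : List (List (List Int))) (j : Nat) (l : List Nat) (c : Int) (acc : List Int) :
    l.foldl
      (fun (st2 : Int × List Int) i =>
        let s : Int := maps.foldl (fun acc m => acc + ((m.getD j []).getD i 0)) 0
        if s > 0 then (st2.1 + 1, st2.2 ++ [1]) else (st2.1, st2.2 ++ [0]))
      (c, acc)
    = (c + (l.map (pvG maps j)).sum, acc ++ l.map (pvG maps j)) := by
  induction l generalizing c acc with
  | nil => simp
  | cons i l ih =>
      simp only [List.foldl_cons, List.map_cons, List.sum_cons]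
      by_cases h : (maps.foldl (fun acc m => acc + ((m.getD j []).getD i 0)) 0 : Int) > 0
      · have hg : pvG maps j i = 1 := by simp only [pvG, pvTot]; exact if_pos h
        rw [if_pos h, ih, hg]
        simp [add_assoc]
      · have hg : pvG maps j i = 0 := by simp only [pvG, pvTot]; exact if_neg h
        rw [if_neg h, ih, hg]
        simp

-- A's outer loop collects the rows and sums the per-row counts
theorem pv_outer (maps : List (List (List Int))) (cols : Nat) (l : List Nat) (c : Int) (acc : List (List Int)) :
    l.foldl
      (fun (st : Int × List (List Int)) j =>
        let inner := (List.range cols).foldl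
          (fun (st2 : Int × List Int) i =>
            let s : Int := maps.foldl (fun acc m => acc + ((m.getD j []).getD i 0)) 0
            if s > 0 then (st2.1 + 1, st2.2 ++ [1]) else (st2.1, st2.2 ++ [0]))
          (st.1, ([] : List Int))
        (inner.1, st.2 ++ [inner.2]))
      (c, acc)
    = (c + (l.map (fun j => (((List.range cols).map (pvG maps j))).sum)).sum,
       acc ++ l.map (fun j => (List.range cols).map (pvG maps j))) := by
  induction l generalizing c acc with
  | nil => simp
  | cons j l ih =>
      simp only [List.foldl_cons, List.map_cons, List.sum_cons]
      rw [pv_inner maps j, ih]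
      simp [add_assoc]

theorem pv_count_eq (res : List (List Int)) (c : Int) :
    res.foldl (fun c row => row.foldl (· + ·) c) c = c + (res.map List.sum).sum := by
  induction res generalizing c with
  | nil => simp
  | cons r res ih =>
      simp only [List.foldl_cons, List.map_cons, List.sum_cons]
      rw [ih, PySem.List.foldl_add r (fun x => x) c]
      simp [add_assoc]

-- ===== VERDICT (by name: the statement is the Claim_ definition above) =====
theorem count_visable_spec : Claim_equal_count_visable := by
  intro maps _ _
  unfold Spec_count_visable count_visable count_visable_alt
  simp only []
  rw [pv_outer maps (((maps.getD 0 []).getD 0 []).length)]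
  have hc : (if (maps.getD 0 []).length = 0 then 0 else ((maps.getD 0 []).getD 0 []).length)
      = ((maps.getD 0 []).getD 0 []).length := by
    by_cases h : (maps.getD 0 []).length = 0
    · have h0 : maps.getD 0 [] = [] := List.length_eq_zero_iff.mp h
      rw [if_pos h, h0]
      rfl
    · exact if_neg h
  rw [hc]
  have hrep : List.replicate (maps.getD 0 []).length (List.replicate ((maps.getD 0 []).getD 0 []).length (0:Int))
      = (List.range (maps.getD 0 []).length).map (fun _ =>
          (List.range ((maps.getD 0 []).getD 0 []).length).map (fun _ => (0:Int))) := by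
    simp [List.map_const']
  rw [hrep, pv_sums_eq ((maps.getD 0 []).length) (((maps.getD 0 []).getD 0 []).length) maps (fun _ _ => 0)]
  rw [pv_count_eq]
  simp only [zero_add, List.nil_append, List.map_map, Prod.mk.injEq]
  constructor
  · apply congrArg List.sum
    apply List.map_congr_left
    intro j _
    simp only [Function.comp_apply, List.map_map]
    apply congrArg List.sum
    apply List.map_congr_left
    intro i _
    simp [Function.comp, pvG, gt_iff_lt]
  · apply List.map_congr_left
    intro j _
    simp only [Function.comp_apply, List.map_map]
    apply List.map_congr_left
    intro i _
    simp [Function.comp, pvG, gt_iff_lt]
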